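-- pv_equiv track=rewrite | github.com/vaclavkozeny/TPB | cv03_vizualize.py | articles_added_over_time
-- ===== SOURCE A (Python) =====
-- def articles_added_over_time(data):
--     data = sorted(data.items())
--     year_articles = {}
--     count = 0
--     for d in data:
--         year_articles[d[0]] = count + d[1]
--         count = count + d[1]
--     return year_articles
-- ===== SOURCE B (Python) =====
-- def articles_added_over_time(data):
--     # Alternative decomposition: grand total first, then one backward pass
--     # emitting (year, running suffix total) pairs, reversed and assembled with dict().
--     items = sorted(data.items())
--     total = sum(v for _, v in items)
--     out = []
--     for k, v in reversed(items):
--         out.append((k, total))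
--         total = total - v
--     out.reverse()
--     return dict(out)
-- ===== Notes on version B (the rewrite author's own statement) =====
-- stated objective: alternative
-- what changed: Instead of a forward loop that maintains a running count and inserts into the dict as it goes, B computes the grand total once, walks the sorted items backwards emitting (year, running-total) pairs while subtracting each value, then reverses the pair list and assembles the dict in one dict() call.
import Mathlib
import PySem

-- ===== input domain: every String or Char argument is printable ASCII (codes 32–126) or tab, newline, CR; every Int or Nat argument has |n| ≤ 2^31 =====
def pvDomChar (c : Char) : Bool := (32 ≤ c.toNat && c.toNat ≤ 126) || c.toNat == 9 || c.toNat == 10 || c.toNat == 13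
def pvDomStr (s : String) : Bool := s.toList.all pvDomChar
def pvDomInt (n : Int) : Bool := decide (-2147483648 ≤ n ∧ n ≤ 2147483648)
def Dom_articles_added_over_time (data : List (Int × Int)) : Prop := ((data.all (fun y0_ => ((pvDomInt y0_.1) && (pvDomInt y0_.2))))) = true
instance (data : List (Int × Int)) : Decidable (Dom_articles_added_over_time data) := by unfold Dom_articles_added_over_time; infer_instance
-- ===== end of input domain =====

-- B replaces A's forward accumulator loop with: grand total, a backward suffix pass
-- emitting (year, running total) pairs, a reverse, and one dict() assembly (alternative decomposition, same cost).


-- ===== PORT A =====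
def articles_added_over_time (data : List (Int × Int)) : List (Int × Int) :=
  let sortedData := PySem.List.sorted2 data Prod.fst Prod.snd
  let st := sortedData.foldl
    (fun (st : PySem.Dict Int Int × Int) d => (st.1.insert d.1 (st.2 + d.2), st.2 + d.2))
    (PySem.Dict.empty, 0)
  st.1.items

-- ===== PORT B =====
def articles_added_over_time_alt (data : List (Int × Int)) : List (Int × Int) :=
  let items := PySem.List.sorted2 data Prod.fst Prod.snd
  let total := (items.map Prod.snd).sum
  let st := items.reverse.foldl
    (fun (st : List (Int × Int) × Int) p => (st.1 ++ [(p.1, st.2)], st.2 - p.2))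
    ([], total)
  (PySem.Dict.ofList st.1.reverse).items

-- ===== PRECONDITION & SPEC =====
def Spec_articles_added_over_time (data : List (Int × Int)) (out : List (Int × Int)) : Prop := out = articles_added_over_time_alt data
instance (data : List (Int × Int)) (out : List (Int × Int)) : Decidable (Spec_articles_added_over_time data out) := by unfold Spec_articles_added_over_time; infer_instance

-- ===== CLAIM (what is proved, stated in full; the proofs are below) =====
def Claim_equal_articles_added_over_time : Prop := ∀ (data : List (Int × Int)), Dom_articles_added_over_time data → Spec_articles_added_over_time data (articles_added_over_time data)

-- ===== LEMMAS AND PROOFS =====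

/-- The sequence of (key, prefix-sum) pairs both programs produce from a list of items. -/
def prefixAnnot (c : Int) : List (Int × Int) → List (Int × Int)
  | [] => []
  | (k, v) :: t => (k, c + v) :: prefixAnnot (c + v) t

/-- A's loop: the dict is exactly `prefixAnnot` inserted in order, and the count is the total. -/
lemma foldA_eq (l : List (Int × Int)) : ∀ (d : PySem.Dict Int Int) (c : Int),
    l.foldl (fun (st : PySem.Dict Int Int × Int) p => (st.1.insert p.1 (st.2 + p.2), st.2 + p.2)) (d, c)
      = ((prefixAnnot c l).foldl (fun dd p => dd.insert p.1 p.2) d, c + (l.map Prod.snd).sum) := by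
  induction l with
  | nil => intro d c; simp [prefixAnnot]
  | cons h t ih =>
      intro d c
      simp only [List.foldl_cons, prefixAnnot, List.map_cons, List.sum_cons, ih]
      ring_nf

/-- B's backward loop over `l.reverse` builds `(prefixAnnot c l).reverse` appended to `out`. -/
lemma foldB_eq (l : List (Int × Int)) : ∀ (out : List (Int × Int)) (c : Int),
    l.reverse.foldl (fun (st : List (Int × Int) × Int) p => (st.1 ++ [(p.1, st.2)], st.2 - p.2))
        (out, c + (l.map Prod.snd).sum)
      = (out ++ (prefixAnnot c l).reverse, c) := by
  induction l with
  | nil => intro out c; simp [prefixAnnot]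
  | cons h t ih =>
      intro out c
      obtain ⟨k, v⟩ := h
      have hsum : c + ((((k, v) :: t)).map Prod.snd).sum = (c + v) + (t.map Prod.snd).sum := by
        simp; ring
      rw [hsum]
      simp only [List.reverse_cons, List.foldl_append, ih]
      simp [prefixAnnot]

lemma ofList_eq_foldl (xs : List (Int × Int)) :
    PySem.Dict.ofList xs = xs.foldl (fun d p => d.insert p.1 p.2) PySem.Dict.empty := by
  simp [PySem.Dict.ofList, PySem.Dict.update]

-- ===== VERDICT (by name: the statement is the Claim_ definition above) =====
theorem articles_added_over_time_spec : Claim_equal_articles_added_over_time := by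
  intro data _
  unfold Spec_articles_added_over_time articles_added_over_time articles_added_over_time_alt
  have hA := foldA_eq (PySem.List.sorted2 data Prod.fst Prod.snd) PySem.Dict.empty 0
  have hB := foldB_eq (PySem.List.sorted2 data Prod.fst Prod.snd) [] 0
  simp only [zero_add] at hA hB
  simp only [hA, hB, List.nil_append, List.reverse_reverse, ofList_eq_foldl]
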